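-- pv_equiv track=rewrite | github.com/SamKry/adventofcode2024 | 09/algo2.py | findEmptyBlock
-- ===== SOURCE A (Python) =====
-- def findEmptyBlock(arr, size):
--     __start = 0
--     for i, item in enumerate(arr):
--         if item == ".":
--             __start = i
--             __end = i
--             while __end < len(arr) and arr[__end] == ".":
--                 __end += 1
--                 if __end - __start == size:
--                     return __start
--     return -1
-- ===== SOURCE B (Python) =====
-- def findEmptyBlock(arr, size):
--     run = 0
--     for i, item in enumerate(arr):
--         if item == ".":
--             run += 1
--             if run == size:
--                 return i + 1 - size
--         else:
--             run = 0
--     return -1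
-- ===== Notes on version B (the rewrite author's own statement) =====
-- stated objective: simpler
-- what changed: Replaces the nested rescan (for each dot, re-scan forward until the run ends or reaches size) by a single flat pass that tracks the current consecutive-dot run length and returns i+1-size when it reaches size.
import Mathlib
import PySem

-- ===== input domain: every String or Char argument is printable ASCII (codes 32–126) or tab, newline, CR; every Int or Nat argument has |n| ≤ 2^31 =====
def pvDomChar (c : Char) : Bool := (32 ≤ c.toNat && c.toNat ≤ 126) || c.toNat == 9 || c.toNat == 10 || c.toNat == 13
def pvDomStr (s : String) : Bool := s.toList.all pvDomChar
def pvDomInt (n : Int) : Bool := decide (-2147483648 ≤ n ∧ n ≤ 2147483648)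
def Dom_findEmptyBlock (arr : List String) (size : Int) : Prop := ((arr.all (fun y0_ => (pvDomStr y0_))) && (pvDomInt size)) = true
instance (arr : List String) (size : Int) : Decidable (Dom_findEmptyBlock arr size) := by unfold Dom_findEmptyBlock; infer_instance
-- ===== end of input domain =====

-- B replaces A's nested per-dot forward rescan by a single pass tracking the current run of dots (objective: simpler).

-- ===== PORT A =====
-- inner while loop: `while __end < len(arr) and arr[__end] == ".": __end += 1; if __end - __start == size: return __start`
def pvAWhile (arr : List String) (size : Int) (start e : Nat) : Option Int :=
  if h : e < arr.length then
    if arr[e]! == "." then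
      if ((e : Int) + 1) - (start : Int) = size then some (start : Int)
      else pvAWhile arr size start (e + 1)
    else none
  else none
termination_by arr.length - e

-- outer `for i, item in enumerate(arr)` as recursion on the index i
def pvAOuter (arr : List String) (size : Int) (i : Nat) : Int :=
  if h : i < arr.length then
    if arr[i]! == "." then
      match pvAWhile arr size i i with
      | some s => s
      | none => pvAOuter arr size (i + 1)
    else pvAOuter arr size (i + 1)
  else -1
termination_by arr.length - i

def findEmptyBlock (arr : List String) (size : Int) : Int := pvAOuter arr size 0

-- ===== PORT B =====
-- single pass over the list, carrying the enumerate index i and the current run of dots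
def pvBLoop (size : Int) (i : Nat) (run : Int) : List String → Int
  | [] => -1
  | item :: rest =>
    if item == "." then
      if run + 1 = size then (i : Int) + 1 - size
      else pvBLoop size (i + 1) (run + 1) rest
    else pvBLoop size (i + 1) 0 rest

def findEmptyBlock_alt (arr : List String) (size : Int) : Int := pvBLoop size 0 0 arr

-- ===== PRECONDITION & SPEC =====
def Spec_findEmptyBlock (arr : List String) (size : Int) (out : Int) : Prop := out = findEmptyBlock_alt arr size
instance (arr : List String) (size : Int) (out : Int) : Decidable (Spec_findEmptyBlock arr size out) := by unfold Spec_findEmptyBlock; infer_instance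

-- ===== CLAIM (what is proved, stated in full; the proofs are below) =====
def Claim_equal_findEmptyBlock : Prop := ∀ (arr : List String) (size : Int), Dom_findEmptyBlock arr size → Spec_findEmptyBlock arr size (findEmptyBlock arr size)

-- ===== LEMMAS AND PROOFS =====

-- number of leading "." entries
def pvDP : List String → Nat
  | [] => 0
  | x :: rest => if x == "." then pvDP rest + 1 else 0

-- A's while loop rephrased on the list suffix
def pvW (size : Int) (start e : Nat) : List String → Option Int
  | [] => none
  | x :: rest =>
    if x == "." then
      if ((e : Int) + 1) - (start : Int) = size then some (start : Int)
      else pvW size start (e + 1) rest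
    else none

-- A's outer loop rephrased on the list suffix
def pvAGoL (size : Int) (i : Nat) : List String → Int
  | [] => -1
  | x :: rest =>
    if x == "." then
      match pvW size i i (x :: rest) with
      | some s => s
      | none => pvAGoL size (i + 1) rest
    else pvAGoL size (i + 1) rest

theorem pvAWhile_eq (arr : List String) (size : Int) (start e : Nat) :
    pvAWhile arr size start e = pvW size start e (arr.drop e) := by
  by_cases h : e < arr.length
  · have hd : arr.drop e = arr[e] :: arr.drop (e + 1) := List.drop_eq_getElem_cons h
    rw [pvAWhile, dif_pos h, hd, pvW, getElem!_pos arr e h]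
    by_cases hdot : arr[e] == "."
    · rw [if_pos hdot, if_pos hdot]
      by_cases hs : ((e : Int) + 1) - (start : Int) = size
      · rw [if_pos hs, if_pos hs]
      · rw [if_neg hs, if_neg hs, pvAWhile_eq arr size start (e + 1)]
    · rw [if_neg hdot, if_neg hdot]
  · have hd : arr.drop e = [] := List.drop_eq_nil_of_le (Nat.le_of_not_lt h)
    rw [pvAWhile, dif_neg h, hd, pvW]
termination_by arr.length - e

theorem pvAOuter_eq (arr : List String) (size : Int) (i : Nat) :
    pvAOuter arr size i = pvAGoL size i (arr.drop i) := by
  by_cases h : i < arr.length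
  · have hd : arr.drop i = arr[i] :: arr.drop (i + 1) := List.drop_eq_getElem_cons h
    rw [pvAOuter, dif_pos h, hd, pvAGoL, getElem!_pos arr i h]
    by_cases hdot : arr[i] == "."
    · rw [if_pos hdot, if_pos hdot, pvAWhile_eq, hd, pvAOuter_eq arr size (i + 1)]
    · rw [if_neg hdot, if_neg hdot, pvAOuter_eq arr size (i + 1)]
  · have hd : arr.drop i = [] := List.drop_eq_nil_of_le (Nat.le_of_not_lt h)
    rw [pvAOuter, dif_neg h, hd, pvAGoL]
termination_by arr.length - i

-- characterisation of the inner scan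
theorem pvW_char (size : Int) (l : List String) : ∀ (start e : Nat),
    pvW size start e l =
      if 1 ≤ size - ((e : Int) - (start : Int)) ∧ size - ((e : Int) - (start : Int)) ≤ (pvDP l : Int)
      then some (start : Int) else none := by
  induction l with
  | nil =>
    intro start e
    rw [pvW, pvDP, if_neg]
    push_cast
    omega
  | cons x rest ih =>
    intro start e
    by_cases hdot : x == "."
    · simp only [pvW, pvDP, if_pos hdot]
      by_cases hs : ((e : Int) + 1) - (start : Int) = size
      · rw [if_pos hs, if_pos (by push_cast; omega)]
      · rw [if_neg hs, ih start (e + 1)]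
        by_cases hc : 1 ≤ size - (((e : Nat) + 1 : Nat) : Int) + (start : Int) ∧
            size - (((e : Nat) + 1 : Nat) : Int) + (start : Int) ≤ (pvDP rest : Int)
        · rw [if_pos (by push_cast at hc ⊢; omega), if_pos (by push_cast at hc ⊢; omega)]
        · rw [if_neg (by push_cast at hc ⊢; omega), if_neg (by push_cast at hc ⊢; omega)]
    · simp only [pvW, pvDP, if_neg hdot]
      rw [if_neg (by push_cast; omega)]

-- A returns i as soon as the block of dots at i is long enough
theorem pvA_hit (size : Int) (l : List String) (i : Nat)
    (h1 : 1 ≤ size) (h2 : size ≤ (pvDP l : Int)) : pvAGoL size i l = (i : Int) := by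
  cases l with
  | nil => simp [pvDP] at h2; omega
  | cons x rest =>
    have hdot : x == "." := by
      by_contra hx
      rw [pvDP, if_neg hx] at h2
      simp at h2
      omega
    rw [pvAGoL, if_pos hdot, pvW_char]
    rw [if_pos (by omega)]

-- B returns the start of the run once the run reaches size
theorem pvB_hit (size : Int) (l : List String) : ∀ (i : Nat) (r : Int), 0 ≤ r → r < size →
    size ≤ r + (pvDP l : Int) → pvBLoop size i r l = (i : Int) - r := by
  induction l with
  | nil => intro i r h0 h1 h2; rw [pvDP] at h2; push_cast at h2; omega
  | cons x rest ih =>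
    intro i r h0 h1 h2
    have hdot : x == "." := by
      by_contra hx
      rw [pvDP, if_neg hx] at h2
      push_cast at h2
      omega
    rw [pvDP, if_pos hdot] at h2
    rw [pvBLoop, if_pos hdot]
    by_cases hs : r + 1 = size
    · rw [if_pos hs]; omega
    · rw [if_neg hs, ih (i + 1) (r + 1) (by omega) (by omega) (by push_cast at h2 ⊢; omega)]
      push_cast
      omega

-- when the leading block is too short, A skips past it
theorem pvA_miss (size : Int) (l : List String) : ∀ (i : Nat),
    ¬(1 ≤ size ∧ size ≤ (pvDP l : Int)) →
    pvAGoL size i l =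
      (match l.drop (pvDP l) with
       | [] => -1
       | _ :: rest => pvAGoL size (i + pvDP l + 1) rest) := by
  induction l with
  | nil => intro i _; rw [pvAGoL, pvDP]; rfl
  | cons x rest ih =>
    intro i h
    by_cases hdot : x == "."
    · have hdp : pvDP (x :: rest) = pvDP rest + 1 := by rw [pvDP, if_pos hdot]
      rw [pvAGoL, if_pos hdot, pvW_char]
      rw [if_neg (by rw [hdp] at h; push_cast at h ⊢; omega)]
      rw [ih (i + 1) (by rw [hdp] at h; push_cast at h ⊢; omega), hdp]
      have : (x :: rest).drop (pvDP rest + 1) = rest.drop (pvDP rest) := rfl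
      rw [this]
      cases hre : rest.drop (pvDP rest) with
      | nil => rfl
      | cons y ys =>
        have he : i + (pvDP rest + 1) + 1 = i + 1 + pvDP rest + 1 := by omega
        rw [he]
    · have hdp : pvDP (x :: rest) = 0 := by rw [pvDP, if_neg hdot]
      rw [pvAGoL, if_neg hdot, hdp, List.drop_zero]

-- when the run cannot reach size inside the leading block, B skips past it and resets
theorem pvB_miss (size : Int) (l : List String) : ∀ (i : Nat) (r : Int), 0 ≤ r →
    ¬(r < size ∧ size ≤ r + (pvDP l : Int)) →
    pvBLoop size i r l =
      (match l.drop (pvDP l) with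
       | [] => -1
       | _ :: rest => pvBLoop size (i + pvDP l + 1) 0 rest) := by
  induction l with
  | nil => intro i r _ _; rw [pvBLoop, pvDP]; rfl
  | cons x rest ih =>
    intro i r h0 h
    by_cases hdot : x == "."
    · have hdp : pvDP (x :: rest) = pvDP rest + 1 := by rw [pvDP, if_pos hdot]
      rw [hdp] at h
      rw [pvBLoop, if_pos hdot, if_neg (by push_cast at h ⊢; omega)]
      rw [ih (i + 1) (r + 1) (by omega) (by push_cast at h ⊢; omega), hdp]
      have : (x :: rest).drop (pvDP rest + 1) = rest.drop (pvDP rest) := rfl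
      rw [this]
      cases hre : rest.drop (pvDP rest) with
      | nil => rfl
      | cons y ys =>
        have he : i + (pvDP rest + 1) + 1 = i + 1 + pvDP rest + 1 := by omega
        rw [he]
    · have hdp : pvDP (x :: rest) = 0 := by rw [pvDP, if_neg hdot]
      rw [pvBLoop, if_neg hdot, hdp, List.drop_zero]

theorem pvMain (size : Int) : ∀ (n : Nat) (l : List String) (i : Nat), l.length ≤ n →
    pvAGoL size i l = pvBLoop size i 0 l := by
  intro n
  induction n with
  | zero =>
    intro l i hl
    have : l = [] := List.eq_nil_of_length_eq_zero (Nat.le_zero.mp hl)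
    subst this
    rw [pvAGoL, pvBLoop]
  | succ m ih =>
    intro l i hl
    by_cases h : 1 ≤ size ∧ size ≤ (pvDP l : Int)
    · rw [pvA_hit size l i h.1 h.2, pvB_hit size l i 0 le_rfl (by omega) (by omega)]
      omega
    · rw [pvA_miss size l i h, pvB_miss size l i 0 le_rfl (by omega)]
      cases hre : l.drop (pvDP l) with
      | nil => rfl
      | cons y ys =>
        have hlen : ys.length ≤ m := by
          have h1 : (l.drop (pvDP l)).length = l.length - pvDP l := List.length_drop
          rw [hre] at h1
          simp at h1
          omega
        exact ih ys (i + pvDP l + 1) hlen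

-- ===== VERDICT (by name: the statement is the Claim_ definition above) =====
theorem findEmptyBlock_spec : Claim_equal_findEmptyBlock := by
  intro arr size _
  unfold Spec_findEmptyBlock findEmptyBlock findEmptyBlock_alt
  rw [pvAOuter_eq, List.drop_zero, pvMain size arr.length arr 0 le_rfl]
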